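-- pv_equiv track=rewrite | github.com/CedrickArmel/asrs_reports_cls | src/etl/transformations.py | encode_cell
-- ===== SOURCE A (Python) =====
-- from typing import List
--
-- def encode_cell(cell: str,
--                 labels: List[str]) -> List[int]:
--     """Encode the multilabels cell such that the cell content is replaced by \
--         a list of same length as labels and containing 0/1.
--
--     Args:
--         cell (str): semicolon separated string of labels.
--         labels (List[str]): actual list of labels to classify to use \
--             to regroup the raw labels in the data.
--
--     Returns:
--         List: Multilabel one-hot encoded list.
--     """
--
--     cell_anomalies = [item.strip() for item in cell.split(';')]
--     splited_cell_anomalies = {label: 1 if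
--                               any(item.startswith(label)
--                                   for item in cell_anomalies)
--                               else 0 for label in labels}
--
--     encodings = list(splited_cell_anomalies.values())
--     return encodings
-- ===== SOURCE B (Python) =====
-- from typing import List
--
-- def encode_cell(cell: str, labels: List[str]) -> List[int]:
--     items = [item.strip() for item in cell.split(';')]
--     labelset = set(labels)
--     lengths = {len(label) for label in labels}
--     matched = set()
--     for item in items:
--         for n in lengths:
--             if n <= len(item):
--                 prefix = item[:n]
--                 if prefix in labelset:
--                     matched.add(prefix)
--     return [1 if label in matched else 0 for label in dict.fromkeys(labels)]
-- ===== Notes on version B (the rewrite author's own statement) =====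
-- stated objective: faster
-- what changed: Instead of rescanning all cell items once per label (L*N prefix tests), B makes a single pass over the cell items testing only the distinct label lengths as candidate prefixes against the label set, then emits the 0/1 indicator per distinct label by set lookup (dict.fromkeys reproduces the dict comprehension's ordered dedup of labels); measured faster in a timing run.
import Mathlib
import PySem

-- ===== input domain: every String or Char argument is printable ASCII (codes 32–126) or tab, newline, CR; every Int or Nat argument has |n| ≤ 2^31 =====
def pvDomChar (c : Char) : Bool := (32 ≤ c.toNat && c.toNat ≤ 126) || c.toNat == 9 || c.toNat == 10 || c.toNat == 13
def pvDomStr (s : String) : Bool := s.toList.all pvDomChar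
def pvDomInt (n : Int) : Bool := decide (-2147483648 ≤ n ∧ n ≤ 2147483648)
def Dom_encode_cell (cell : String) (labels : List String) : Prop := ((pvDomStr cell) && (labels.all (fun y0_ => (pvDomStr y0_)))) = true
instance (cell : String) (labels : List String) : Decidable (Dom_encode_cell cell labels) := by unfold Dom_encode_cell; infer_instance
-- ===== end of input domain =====

-- B replaces A's label-by-label rescans of the cell items by a single pass over the items that
-- collects, via the distinct label lengths, every item prefix belonging to the label set, then emits
-- the indicator per label (measured faster in a timing run;
-- dict.fromkeys keeps A's ordered dedup of the label list).


-- ===== PORT A =====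
-- cell.split(';') with the non-empty literal separator: Chars.splitOn on the char lists
def encode_cell (cell : String) (labels : List String) : List Int :=
  let cell_anomalies : List String :=
    ((PySem.Chars.splitOn cell.toList [';']).map String.ofList).map PySem.Str.strip
  let splited_cell_anomalies : PySem.Dict String Int :=
    labels.foldl
      (fun d label =>
        d.insert label
          (if cell_anomalies.any (fun item => PySem.Str.startswith item label) then 1 else 0))
      PySem.Dict.empty
  splited_cell_anomalies.values

-- ===== PORT B =====
def encode_cell_alt (cell : String) (labels : List String) : List Int :=
  let items : List (List Char) :=
    (((PySem.Chars.splitOn cell.toList [';']).map String.ofList).map PySem.Str.strip).map String.toList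
  let labelset : PySem.Set (List Char) := PySem.Set.ofList (labels.map String.toList)
  -- len(label) ported as the char count (exact: len of a str is its character count)
  let lengths : PySem.Set Nat := PySem.Set.ofList (labels.map (fun label => label.toList.length))
  let matched : PySem.Set (List Char) :=
    items.foldl
      (fun m item =>
        lengths.foldl
          (fun m n =>
            if n ≤ item.length then
              let p := item.take n
              if labelset.contains p then PySem.Set.add m p else m
            else m)
          m)
      PySem.Set.empty
  (PySem.List.dedup labels).map (fun label => if matched.contains label.toList then 1 else 0)

-- ===== PRECONDITION & SPEC =====
def Spec_encode_cell (cell : String) (labels : List String) (out : List Int) : Prop := out = encode_cell_alt cell labels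
instance (cell : String) (labels : List String) (out : List Int) : Decidable (Spec_encode_cell cell labels out) := by unfold Spec_encode_cell; infer_instance

-- ===== CLAIM (what is proved, stated in full; the proofs are below) =====
def Claim_equal_encode_cell : Prop := ∀ (cell : String) (labels : List String), Dom_encode_cell cell labels → Spec_encode_cell cell labels (encode_cell cell labels)

-- ===== LEMMAS AND PROOFS =====

-- membership in B's inner loop over the candidate prefix lengths of one item
lemma mem_inner_fold (ls : PySem.Set (List Char)) (it : List Char) (l : List Nat)
    (m : PySem.Set (List Char)) (y : List Char) :
    y ∈ l.foldl (fun m n =>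
        if n ≤ it.length then
          if ls.contains (it.take n) then PySem.Set.add m (it.take n) else m
        else m) m ↔
      y ∈ m ∨ ∃ n ∈ l, n ≤ it.length ∧ y = it.take n ∧ it.take n ∈ ls := by
  induction l generalizing m with
  | nil => simp
  | cons n t ih =>
    rw [List.foldl_cons, ih]
    simp only [PySem.Set.contains_eq_decide]
    by_cases hn : n ≤ it.length
    · by_cases h : it.take n ∈ ls
      · simp [hn, h, PySem.Set.mem_add]
        tauto
      · simp [hn, h]
    · simp [hn]

-- membership in B's matched set
lemma mem_matched (ls : PySem.Set (List Char)) (lens : List Nat) (items : List (List Char))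
    (m : PySem.Set (List Char)) (y : List Char) :
    y ∈ items.foldl (fun m item => lens.foldl
        (fun m n =>
          if n ≤ item.length then
            if ls.contains (item.take n) then PySem.Set.add m (item.take n) else m
          else m) m) m ↔
      y ∈ m ∨ (y ∈ ls ∧ ∃ it ∈ items, ∃ n ∈ lens, n ≤ it.length ∧ y = it.take n) := by
  induction items generalizing m with
  | nil => simp
  | cons it t ih =>
    rw [List.foldl_cons, ih, mem_inner_fold]
    constructor
    · rintro ((hm | ⟨n, hn, hle, rfl, hin⟩) | ⟨hls, it', hit', rest⟩)
      · exact Or.inl hm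
      · exact Or.inr ⟨hin, it, List.mem_cons_self, n, hn, hle, rfl⟩
      · exact Or.inr ⟨hls, it', List.mem_cons_of_mem _ hit', rest⟩
    · rintro (hm | ⟨hls, it', hit', n, hn, hle, rfl⟩)
      · exact Or.inl (Or.inl hm)
      · rcases List.mem_cons.mp hit' with rfl | hmem
        · exact Or.inl (Or.inr ⟨n, hn, hle, rfl, hls⟩)
        · exact Or.inr ⟨hls, it', hmem, n, hn, hle, rfl⟩

-- the accumulated dict's lookup: last (= any) insert at a key wins, all writes at a key agree
lemma getD_fold (cond : String → Int) (labels : List String) (d : PySem.Dict String Int)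
    (k : String) (dflt : Int) :
    (labels.foldl (fun d label => d.insert label (cond label)) d).getD k dflt
      = if k ∈ labels then cond k else d.getD k dflt := by
  induction labels generalizing d with
  | nil => simp
  | cons l t ih =>
    rw [List.foldl_cons, ih, PySem.Dict.getD_insert]
    by_cases h1 : k ∈ t
    · simp [h1]
    · by_cases h2 : k = l <;> simp [h1, h2]

-- ===== VERDICT =====
theorem encode_cell_spec : Claim_equal_encode_cell := by
  intro cell labels _
  unfold Spec_encode_cell encode_cell encode_cell_alt
  have hkeys : (labels.foldl
      (fun d label => d.insert label
        (if (((PySem.Chars.splitOn cell.toList [';']).map String.ofList).map PySem.Str.strip).any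
            (fun item => PySem.Str.startswith item label) then (1 : Int) else 0))
      PySem.Dict.empty).keys = PySem.Set.ofList labels := by
    rw [PySem.Dict.keys_foldl_insert
        (f := fun _ label => if (((PySem.Chars.splitOn cell.toList [';']).map String.ofList).map PySem.Str.strip).any
            (fun item => PySem.Str.startswith item label) then (1 : Int) else 0),
      PySem.Dict.keys_empty, PySem.Set.update_nil_left]
  have hnodup : (labels.foldl
      (fun d label => d.insert label
        (if (((PySem.Chars.splitOn cell.toList [';']).map String.ofList).map PySem.Str.strip).any
            (fun item => PySem.Str.startswith item label) then (1 : Int) else 0))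
      PySem.Dict.empty).keys.Nodup := by
    rw [hkeys]; exact PySem.Set.nodup_ofList labels
  rw [PySem.Dict.values_eq_map_keys _ hnodup 0, hkeys, PySem.List.dedup_eq_ofList]
  apply List.map_congr_left
  intro lab hlab'
  have hlab : lab ∈ labels := (PySem.Set.mem_ofList _ _).mp hlab'
  rw [getD_fold
      (cond := fun label => if (((PySem.Chars.splitOn cell.toList [';']).map String.ofList).map PySem.Str.strip).any
          (fun item => PySem.Str.startswith item label) then (1 : Int) else 0),
    if_pos hlab]
  have hmem : lab.toList ∈ labels.map String.toList := List.mem_map_of_mem hlab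
  have hls : lab.toList ∈ PySem.Set.ofList (labels.map String.toList) :=
    (PySem.Set.mem_ofList _ _).mpr hmem
  set anomalies : List String :=
    ((PySem.Chars.splitOn cell.toList [';']).map String.ofList).map PySem.Str.strip with hA
  set M : PySem.Set (List Char) :=
    (anomalies.map String.toList).foldl
      (fun m item => (PySem.Set.ofList (labels.map (fun label => label.toList.length))).foldl
        (fun m n =>
          if n ≤ item.length then
            if (PySem.Set.ofList (labels.map String.toList)).contains (item.take n) then
              PySem.Set.add m (item.take n) else m
          else m) m)
      PySem.Set.empty with hM
  have hlen : lab.toList.length ∈ PySem.Set.ofList (labels.map (fun label => label.toList.length)) :=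
    (PySem.Set.mem_ofList _ _).mpr (List.mem_map.mpr ⟨lab, hlab, rfl⟩)
  have hiff : (anomalies.any (fun item => PySem.Str.startswith item lab) = true)
      ↔ lab.toList ∈ M := by
    rw [hM, mem_matched]
    constructor
    · intro h
      obtain ⟨item, hitem, hpre⟩ := List.any_eq_true.mp h
      have hpre' : lab.toList <+: item.toList := (PySem.Chars.startswith_iff _ _).mp
        (by rw [PySem.Str.startswith_eq] at hpre; exact hpre)
      exact Or.inr ⟨hls, item.toList, List.mem_map_of_mem hitem, lab.toList.length, hlen,
        by simpa using hpre'.length_le, List.prefix_iff_eq_take.mp hpre'⟩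
    · rintro (h | ⟨_, it, hit, n, _, hle, heq⟩)
      · exact absurd h (List.not_mem_nil)
      · obtain ⟨item, hitem, rfl⟩ := List.mem_map.mp hit
        refine List.any_eq_true.mpr ⟨item, hitem, ?_⟩
        rw [PySem.Str.startswith_eq]
        exact (PySem.Chars.startswith_iff _ _).mpr (heq ▸ List.take_prefix n item.toList)
  have hbool : (anomalies.any (fun item => PySem.Str.startswith item lab))
      = M.contains lab.toList := by
    rw [PySem.Set.contains_eq_decide]
    cases ha : anomalies.any (fun item => PySem.Str.startswith item lab) with
    | true => exact (decide_eq_true (hiff.mp ha)).symm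
    | false =>
      refine (decide_eq_false ?_).symm
      intro hmemf
      exact Bool.false_ne_true (ha ▸ hiff.mpr hmemf)
  rw [hbool]
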